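-- pv_equiv track=rewrite | github.com/woodongk/python-algorithm-study | BOJ/1229 빅뱅의 여섯 번째 멤버.py | bigbang
-- ===== SOURCE A (Python) =====
-- def bigbang(n):
--     if n == 0:
--         return 0
--     if n == 1:
--         return 1
--     bottom_up_lst = [None] * (n + 1)
--     bottom_up_lst[0] = 1
--     bottom_up_lst[1] = 1
--
--     for i in range(2, n + 1):
--         bottom_up_lst[i] = bottom_up_lst[i - 1] + (1 + 4 * (i - 1))
--     return bottom_up_lst
-- ===== SOURCE B (Python) =====
-- def bigbang(n):
--     if n == 0:
--         return 0
--     if n == 1: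
--         return 1
--     return [1] + [2 * i * i - i for i in range(1, n + 1)]
-- ===== Notes on version B (the rewrite author's own statement) =====
-- stated objective: simpler
-- what changed: Replaces the dependent bottom-up recurrence (each cell computed from the previous cell plus 1+4*(i-1)) with the closed form 2*i*i - i evaluated independently per index in a comprehension.
-- outside the precondition, e.g. on bigbang(0): A returns 0, B returns 0; on bigbang(1): A returns 1, B returns 1
import Mathlib
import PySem

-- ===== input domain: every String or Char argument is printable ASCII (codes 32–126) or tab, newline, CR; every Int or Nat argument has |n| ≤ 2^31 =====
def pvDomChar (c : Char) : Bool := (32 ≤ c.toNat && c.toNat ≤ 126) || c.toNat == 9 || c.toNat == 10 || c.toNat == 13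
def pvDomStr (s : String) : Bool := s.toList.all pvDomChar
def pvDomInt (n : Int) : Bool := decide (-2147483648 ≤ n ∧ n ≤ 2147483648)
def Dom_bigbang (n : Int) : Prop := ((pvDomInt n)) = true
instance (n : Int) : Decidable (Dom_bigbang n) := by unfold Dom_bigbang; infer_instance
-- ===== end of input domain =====

-- B replaces A's dependent recurrence by the independent closed form 2*i*i - i per index (simpler).

-- ===== PORT A =====
-- [None]*(n+1) is modelled as a list of 0 placeholders: under Pre_ (2 ≤ n) every cell is
-- written before it is read or returned, so the placeholder value is never observable.
def bigbang (n : Int) : List Int :=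
  if n = 0 then []        -- Python returns the scalar 0 here (outside Pre_)
  else if n = 1 then []   -- Python returns the scalar 1 here (outside Pre_)
  else
    let lst := PySem.List.pyRepeat [(0 : Int)] (n + 1)
    let lst := PySem.List.pySetD lst 0 1
    let lst := PySem.List.pySetD lst 1 1
    (PySem.List.pyRange 2 (n + 1) 1).foldl
      (fun l i => PySem.List.pySetD l i (PySem.List.pyGetD l (i - 1) 0 + (1 + 4 * (i - 1)))) lst

-- ===== PORT B =====
def bigbang_alt (n : Int) : List Int :=
  if n = 0 then []        -- Python returns the scalar 0 here (outside Pre_)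
  else if n = 1 then []   -- Python returns the scalar 1 here (outside Pre_)
  else (1 : Int) :: (PySem.List.pyRange 1 (n + 1) 1).map (fun i => 2 * i * i - i)

-- ===== PRECONDITION & SPEC =====
-- Pre_ excludes n < 0, where A raises IndexError, and n = 0 / n = 1, where A returns the
-- scalar ints 0 and 1 — not a value of the declared list type (B's Python returns the same scalars there).
def Pre_bigbang (n : Int) : Prop := 2 ≤ n
instance (n : Int) : Decidable (Pre_bigbang n) := by unfold Pre_bigbang; infer_instance
def pvWitness_bigbang : Int := (5)
def Spec_bigbang (n : Int) (out : List Int) : Prop := out = bigbang_alt n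
instance (n : Int) (out : List Int) : Decidable (Spec_bigbang n out) := by unfold Spec_bigbang; infer_instance

-- ===== CLAIM (what is proved, stated in full; the proofs are below) =====
def Claim_equal_bigbang : Prop := ∀ (n : Int), Dom_bigbang n → Pre_bigbang n → Spec_bigbang n (bigbang n)

-- ===== LEMMAS AND PROOFS =====

-- the closed form
def pvF (i : Int) : Int := 2 * i * i - i

-- partial state of A's loop: after processing range(2, k), for 2 ≤ k ≤ n+1
def pvTarget (n k : Int) : List Int :=
  (1 : Int) :: ((PySem.List.pyRange 1 k 1).map pvF ++ List.replicate (n + 1 - k).toNat 0)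

lemma pvTarget_len (n k : Int) (h1 : 1 ≤ k) (hk : k ≤ n + 1) :
    (pvTarget n k).length = (n + 1).toNat := by
  simp [pvTarget, PySem.List.length_pyRange_one]
  omega

-- A's initial list equals pvTarget n 2
lemma pvInit_eq (n : Int) (hn : 2 ≤ n) :
    PySem.List.pySetD (PySem.List.pySetD (PySem.List.pyRepeat [(0 : Int)] (n + 1)) 0 1) 1 1
      = pvTarget n 2 := by
  rw [PySem.List.pyRepeat_singleton]
  rw [PySem.List.pySetD_of_nonneg _ _ (by omega : (0:Int) ≤ 0)]
  rw [PySem.List.pySetD_of_nonneg _ _ (by omega : (0:Int) ≤ 1)]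
  have h3 : (n + 1).toNat = 2 + (n - 1).toNat := by omega
  have h4 : (n + 1 - 2).toNat = (n - 1).toNat := by omega
  rw [h3, List.replicate_add]
  have hr : PySem.List.pyRange 1 2 1 = [1] := by decide
  simp [pvTarget, hr, pvF, h4, List.replicate]

-- one loop step advances pvTarget n k to pvTarget n (k+1)
lemma pvStep_eq (n k : Int) (h2 : 2 ≤ k) (hk : k ≤ n) :
    PySem.List.pySetD (pvTarget n k) k
        (PySem.List.pyGetD (pvTarget n k) (k - 1) 0 + (1 + 4 * (k - 1)))
      = pvTarget n (k + 1) := by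
  have hlenm : ((PySem.List.pyRange 1 k 1).map pvF).length = (k - 1).toNat := by
    simp [PySem.List.length_pyRange_one]
  -- the read at index k-1 returns pvF (k-1)
  have hget : PySem.List.pyGetD (pvTarget n k) (k - 1) 0 = pvF (k - 1) := by
    have hlen : k - 1 < ((pvTarget n k).length : Int) := by
      rw [pvTarget_len n k (by omega) (by omega)]; omega
    rw [PySem.List.pyGetD_eq_getElem _ _ (by omega) hlen]
    have hidx : (k - 1).toNat = (k - 2).toNat + 1 := by omega
    simp only [pvTarget, hidx]
    rw [List.getElem_cons_succ]
    have hlt : (k - 2).toNat < ((PySem.List.pyRange 1 k 1).map pvF).length := by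
      rw [hlenm]; omega
    rw [List.getElem_append_left hlt, List.getElem_map,
        PySem.List.getElem_pyRange_one]
    congr 1
    omega
  rw [hget]
  have harith : pvF (k - 1) + (1 + 4 * (k - 1)) = pvF k := by
    simp only [pvF]; ring
  rw [harith]
  -- the write at index k extends the computed prefix by one cell
  rw [PySem.List.pySetD_of_nonneg _ _ (by omega : (0:Int) ≤ k)]
  have hidx : k.toNat = (k - 1).toNat + 1 := by omega
  unfold pvTarget
  rw [hidx, List.set_cons_succ]
  have hrep : (n + 1 - k).toNat = 1 + (n - k).toNat := by omega
  rw [hrep, List.replicate_add, List.replicate_one]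
  rw [List.set_append_right _ _ (by rw [hlenm])]
  rw [hlenm]
  simp only [Nat.sub_self, List.singleton_append, List.set_cons_zero]
  rw [PySem.List.pyRange_one_succ_right (by omega : (1:Int) ≤ k), List.map_append]
  simp

-- the loop, run for t steps from the initial state, reaches pvTarget n (2 + t)
lemma pvLoop_eq (n : Int) :
    ∀ (t : Nat), (t : Int) ≤ n - 1 →
      (PySem.List.pyRange 2 (2 + t) 1).foldl
        (fun l i => PySem.List.pySetD l i (PySem.List.pyGetD l (i - 1) 0 + (1 + 4 * (i - 1))))
        (pvTarget n 2)
      = pvTarget n (2 + t) := by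
  intro t
  induction t with
  | zero => intro _; simp [PySem.List.pyRange_one_eq_nil]
  | succ t ih =>
    intro ht
    have ht' : (t : Int) ≤ n - 1 := by push_cast at ht ⊢; omega
    have hcast : (2 : Int) + ((t : Nat) + 1 : Nat) = (2 + t) + 1 := by push_cast; ring
    rw [hcast, PySem.List.pyRange_one_succ_right (by omega : (2:Int) ≤ 2 + t),
        List.foldl_append, ih ht']
    simp only [List.foldl_cons, List.foldl_nil]
    exact pvStep_eq n (2 + t) (by omega) (by push_cast at ht; omega)

-- ===== VERDICT (by name: the statement is the Claim_ definition above) =====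
theorem bigbang_spec : Claim_equal_bigbang := by
  intro n _ hpre
  have hn : 2 ≤ n := hpre
  have h0 : ¬ n = 0 := by omega
  have h1 : ¬ n = 1 := by omega
  unfold Spec_bigbang bigbang bigbang_alt
  rw [if_neg h0, if_neg h1, if_neg h0, if_neg h1]
  simp only []
  rw [pvInit_eq n hn]
  have ht : (((n - 1).toNat : Int)) ≤ n - 1 := by omega
  have h2 : (2 : Int) + ((n - 1).toNat : Int) = n + 1 := by omega
  have hloop := pvLoop_eq n (n - 1).toNat ht
  rw [h2] at hloop
  rw [hloop]
  unfold pvTarget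
  simp [pvF]
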